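-- pv_equiv track=rewrite | github.com/mechanical-girl/kobold-training-club | ktc/main.py | party_thresholds_calc
-- ===== SOURCE A (Python) =====
-- from typing import List, Tuple
--
-- xp_per_day_per_character_per_level = [
--     0,
--     300,
--     600,
--     1200,
--     1700,
--     3500,
--     4000,
--     5000,
--     6000,
--     7500,
--     9000,
--     10500,
--     11500,
--     13500,
--     15000,
--     18000,
--     20000,
--     25000,
--     27000,
--     30000,
--     40000,
-- ]
--
-- xp_thresholds: List[List[int]] = [
--     [],
--     [25, 50, 75, 100],
--     [50, 100, 150, 200],
--     [75, 150, 225, 400],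
--     [125, 250, 375, 500],
--     [250, 500, 750, 1100],
--     [300, 600, 900, 1400],
--     [350, 750, 1100, 1700],
--     [450, 900, 1400, 2100],
--     [550, 1100, 1600, 2400],
--     [600, 1200, 1900, 2800],
--     [800, 1600, 2400, 3600],
--     [1000, 2000, 3000, 4500],
--     [1100, 2200, 3400, 5100],
--     [1250, 2500, 3800, 5700],
--     [1400, 2800, 4300, 6400],
--     [1600, 3200, 4800, 7200],
--     [2000, 3900, 5900, 8800],
--     [2100, 4200, 6300, 9500],
--     [2400, 4900, 7300, 10900],
--     [2800, 5700, 8500, 12700],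
-- ]
--
-- PartyType = List[Tuple[int, int]]
--
-- def party_thresholds_calc(party: PartyType) -> List[int]:
--     party_thresholds = [0, 0, 0, 0, 0]
--     for tup in party:
--         (size, level) = tup
--         for i in range(len(party_thresholds) - 1):
--             party_thresholds[i] += xp_thresholds[level][i] * size
--         party_thresholds[4] += xp_per_day_per_character_per_level[level] * size
--
--     return party_thresholds
-- ===== SOURCE B (Python) =====
-- from typing import List, Tuple
--
-- xp_per_day_per_character_per_level = [
--     0, 300, 600, 1200, 1700, 3500, 4000, 5000, 6000, 7500, 9000,
--     10500, 11500, 13500, 15000, 18000, 20000, 25000, 27000, 30000, 40000,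
-- ]
--
-- xp_thresholds: List[List[int]] = [
--     [],
--     [25, 50, 75, 100],
--     [50, 100, 150, 200],
--     [75, 150, 225, 400],
--     [125, 250, 375, 500],
--     [250, 500, 750, 1100],
--     [300, 600, 900, 1400],
--     [350, 750, 1100, 1700],
--     [450, 900, 1400, 2100],
--     [550, 1100, 1600, 2400],
--     [600, 1200, 1900, 2800],
--     [800, 1600, 2400, 3600],
--     [1000, 2000, 3000, 4500],
--     [1100, 2200, 3400, 5100],
--     [1250, 2500, 3800, 5700],
--     [1400, 2800, 4300, 6400],
--     [1600, 3200, 4800, 7200],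
--     [2000, 3900, 5900, 8800],
--     [2100, 4200, 6300, 9500],
--     [2400, 4900, 7300, 10900],
--     [2800, 5700, 8500, 12700],
-- ]
--
-- PartyType = List[Tuple[int, int]]
--
-- def party_thresholds_calc(party: PartyType) -> List[int]:
--     # column-major: each output slot is its own independent sum over the party
--     def col(i: int) -> int:
--         return sum(xp_thresholds[level][i] * size for (size, level) in party)
--     day = sum(xp_per_day_per_character_per_level[level] * size for (size, level) in party)
--     return [col(0), col(1), col(2), col(3), day]
-- ===== Notes on version B (the rewrite author's own statement) =====
-- stated objective: alternative
-- what changed: Transposed the computation from a single row-major pass mutating a shared 5-slot accumulator to five independent column-wise sums over the party (one per output slot), built directly as the result list.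
import Mathlib
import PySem

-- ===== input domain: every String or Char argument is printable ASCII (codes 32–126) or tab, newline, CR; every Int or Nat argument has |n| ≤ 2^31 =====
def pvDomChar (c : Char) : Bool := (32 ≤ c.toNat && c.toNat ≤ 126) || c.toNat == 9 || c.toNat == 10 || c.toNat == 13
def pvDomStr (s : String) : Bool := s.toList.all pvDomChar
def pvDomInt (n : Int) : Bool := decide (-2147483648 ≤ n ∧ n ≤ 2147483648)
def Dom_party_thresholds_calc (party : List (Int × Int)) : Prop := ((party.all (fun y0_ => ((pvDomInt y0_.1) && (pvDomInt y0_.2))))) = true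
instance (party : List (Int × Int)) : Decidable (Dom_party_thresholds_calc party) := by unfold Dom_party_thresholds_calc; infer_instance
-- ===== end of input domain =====

-- B transposes A's single row-major accumulating pass into five independent column-wise
-- sums over the party (objective: alternative decomposition; same cost).

-- ===== PORT A =====
def xpDay : List Int := [0,300,600,1200,1700,3500,4000,5000,6000,7500,9000,10500,11500,13500,15000,18000,20000,25000,27000,30000,40000]

def xpThr : List (List Int) := [
  [],
  [25, 50, 75, 100],
  [50, 100, 150, 200],
  [75, 150, 225, 400],
  [125, 250, 375, 500],
  [250, 500, 750, 1100],
  [300, 600, 900, 1400],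
  [350, 750, 1100, 1700],
  [450, 900, 1400, 2100],
  [550, 1100, 1600, 2400],
  [600, 1200, 1900, 2800],
  [800, 1600, 2400, 3600],
  [1000, 2000, 3000, 4500],
  [1100, 2200, 3400, 5100],
  [1250, 2500, 3800, 5700],
  [1400, 2800, 4300, 6400],
  [1600, 3200, 4800, 7200],
  [2000, 3900, 5900, 8800],
  [2100, 4200, 6300, 9500],
  [2400, 4900, 7300, 10900],
  [2800, 5700, 8500, 12700]]

-- one iteration of A's outer loop: inner 'for i in range(4)' then slot 4
def aStep (acc : List Int) (tup : Int × Int) : List Int :=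
  let size := tup.1
  let level := tup.2
  let acc1 := (PySem.List.pyRange 0 4 1).foldl (fun a i =>
      a.set i.toNat (a.getD i.toNat 0 +
        ((PySem.List.pyGet? ((PySem.List.pyGet? xpThr level).getD []) i).getD 0) * size)) acc
  acc1.set 4 (acc1.getD 4 0 + ((PySem.List.pyGet? xpDay level).getD 0) * size)

def party_thresholds_calc (party : List (Int × Int)) : List Int :=
  party.foldl aStep [0, 0, 0, 0, 0]

-- ===== PORT B =====
-- Source B's col(i): sum over the party of xp_thresholds[level][i] * size
def colSum (party : List (Int × Int)) (i : Int) : Int :=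
  (party.map (fun p => ((PySem.List.pyGet? ((PySem.List.pyGet? xpThr p.2).getD []) i).getD 0) * p.1)).sum

-- Source B's day sum
def daySum (party : List (Int × Int)) : Int :=
  (party.map (fun p => ((PySem.List.pyGet? xpDay p.2).getD 0) * p.1)).sum

def party_thresholds_calc_alt (party : List (Int × Int)) : List Int :=
  [colSum party 0, colSum party 1, colSum party 2, colSum party 3, daySum party]

-- ===== PRECONDITION & SPEC =====
-- Pre_ excludes exactly the inputs where the Python A raises IndexError: a level 0 or -21
-- (empty threshold row) or outside [-21, 20] (table index out of range).
def Pre_party_thresholds_calc (party : List (Int × Int)) : Prop :=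
  ∀ p ∈ party, (1 ≤ p.2 ∧ p.2 ≤ 20) ∨ (-20 ≤ p.2 ∧ p.2 ≤ -1)
instance (party : List (Int × Int)) : Decidable (Pre_party_thresholds_calc party) := by
  unfold Pre_party_thresholds_calc; infer_instance

def pvWitness_party_thresholds_calc : (List (Int × Int)) := [(2, 3), (1, 5)]

def Spec_party_thresholds_calc (party : List (Int × Int)) (out : List Int) : Prop := out = party_thresholds_calc_alt party
instance (party : List (Int × Int)) (out : List Int) : Decidable (Spec_party_thresholds_calc party out) := by unfold Spec_party_thresholds_calc; infer_instance

-- ===== CLAIM (what is proved, stated in full; the proofs are below) =====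
def Claim_equal_party_thresholds_calc : Prop := ∀ (party : List (Int × Int)), Dom_party_thresholds_calc party → Pre_party_thresholds_calc party → Spec_party_thresholds_calc party (party_thresholds_calc party)

-- ===== LEMMAS AND PROOFS =====

lemma foldl_aStep (party : List (Int × Int)) :
    ∀ a0 a1 a2 a3 a4 : Int,
      party.foldl aStep [a0, a1, a2, a3, a4] =
        [a0 + colSum party 0, a1 + colSum party 1, a2 + colSum party 2,
         a3 + colSum party 3, a4 + daySum party] := by
  induction party with
  | nil => intro a0 a1 a2 a3 a4; simp [colSum, daySum]
  | cons p rest ih =>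
      intro a0 a1 a2 a3 a4
      rw [List.foldl_cons]
      have hstep : aStep [a0, a1, a2, a3, a4] p =
          [a0 + ((PySem.List.pyGet? ((PySem.List.pyGet? xpThr p.2).getD []) 0).getD 0) * p.1,
           a1 + ((PySem.List.pyGet? ((PySem.List.pyGet? xpThr p.2).getD []) 1).getD 0) * p.1,
           a2 + ((PySem.List.pyGet? ((PySem.List.pyGet? xpThr p.2).getD []) 2).getD 0) * p.1,
           a3 + ((PySem.List.pyGet? ((PySem.List.pyGet? xpThr p.2).getD []) 3).getD 0) * p.1,
           a4 + ((PySem.List.pyGet? xpDay p.2).getD 0) * p.1] := by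
        simp [aStep, PySem.List.pyRange]
        rfl
      rw [hstep, ih]
      simp [colSum, daySum]
      omega

theorem party_thresholds_calc_main (party : List (Int × Int)) :
    party_thresholds_calc party = party_thresholds_calc_alt party := by
  rw [party_thresholds_calc, party_thresholds_calc_alt, foldl_aStep]
  simp

-- ===== VERDICT (by name: the statement is the Claim_ definition above) =====
theorem party_thresholds_calc_spec : Claim_equal_party_thresholds_calc := by
  intro party _ _
  exact party_thresholds_calc_main party
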